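-- pv_equiv track=rewrite | github.com/klo9klo9kloi/TJHSST-AI | ai/Games/ghostc.py | wouldWin
-- ===== SOURCE A (Python) =====
-- def narrow(word, wordlist):
--   if word == "":
--     return wordlist
--   possible = {}
--   size = len(word)
--   for strings in wordlist:
--     string = strings[:size]
--     if word == string:
--       possible[strings] = None
--   return possible
--
-- def givePoss(word, wordlist):
--   possible = []
--   size = len(word)
--   for strings in wordlist:
--     string = strings[:size]
--     if word == string:
--       possible.append(strings)
--   if len(possible) == 0:
--     return possible
--   hints = []
--   for poss in possible:
--     letter = poss[size: size+1]
--     if letter not in hints: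
--       hints.append(letter)
--   if len(hints) > 0:
--     return sorted(hints)
--   return possible
--
-- def wouldWin(possplay, wordlist, turn):
--   if possplay in wordlist:
--     if len(possplay)%2 == turn:
--       return True
--     else:
--       return False
--   possible = givePoss(possplay, wordlist)
--   narrowed = narrow(possplay, wordlist)
--   for poss in possible:
--     attempt = possplay + poss
--     returned = wouldWin(attempt, narrowed, (turn+1) % 2)
--     if returned == False:
--       return True
--   return False
-- ===== SOURCE B (Python) =====
-- def _win(suffixes, par, turn):
--     if "" in suffixes:
--         return par == turn
--     letters = set()
--     for s in suffixes:
--         letters.add(s[:1])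
--     for c in sorted(letters):
--         if not _win([s[1:] for s in suffixes if s[:1] == c], 1 - par, (turn + 1) % 2):
--             return True
--     return False
--
-- def wouldWin(possplay, wordlist, turn):
--     n = len(possplay)
--     suffixes = [w[n:] for w in wordlist if w[:n] == possplay]
--     return _win(suffixes, n % 2, turn)
-- ===== Notes on version B (the rewrite author's own statement) =====
-- stated objective: faster
-- what changed: B reduces the word list to suffixes of the prefix once and then runs a DFS that splits the suffix list by first letter at each game node (a DFS of the lazily built suffix trie), instead of A's rebuilding a prefix filter plus a narrowed dict over the whole word list with full prefix comparisons at every node.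
import Mathlib
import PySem

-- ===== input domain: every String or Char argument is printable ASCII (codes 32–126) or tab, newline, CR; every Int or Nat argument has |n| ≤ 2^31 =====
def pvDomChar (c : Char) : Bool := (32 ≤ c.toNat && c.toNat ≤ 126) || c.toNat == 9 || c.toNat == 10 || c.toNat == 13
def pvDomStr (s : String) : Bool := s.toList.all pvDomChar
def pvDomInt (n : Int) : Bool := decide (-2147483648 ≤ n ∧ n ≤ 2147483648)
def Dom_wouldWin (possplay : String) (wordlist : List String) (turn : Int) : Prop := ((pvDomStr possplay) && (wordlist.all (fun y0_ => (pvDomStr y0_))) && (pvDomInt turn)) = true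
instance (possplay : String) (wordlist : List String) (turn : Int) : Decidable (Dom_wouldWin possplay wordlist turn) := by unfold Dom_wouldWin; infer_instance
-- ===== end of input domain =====

-- B replaces A's per-level re-scan of the whole word list (rebuilding a prefix filter and a dict of
-- the narrowed words at every game node) by a single suffix-list DFS (a DFS of the lazily-built
-- suffix trie); the return value is proved identical.

-- Both ports work on code points (String.toList); PySem string primitives are defined on toList.
-- Python locals that just name a subexpression (size, string, letter, attempt) are inlined.
-- Shared fuel bound for the two fuelled recursions: the recursion deepens only while some word
-- strictly extends the current prefix, so total length + 2 always suffices.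
def pvTotalLen (wl : List (List Char)) : Nat := wl.foldl (fun a w => a + w.length) 0

-- ===== PORT A =====
def narrowA (word : List Char) (wl : List (List Char)) : List (List Char) :=
  if word = [] then wl
  else
    -- Python builds a dict {strings: None}; the caller only iterates over / tests membership in its
    -- keys (first-insertion order, deduplicated), so the port returns the key list.
    (wl.foldl (fun (d : PySem.Dict (List Char) Unit) strings =>
        if word = PySem.List.slice strings none (some (word.length : Int)) then d.insert strings ()
        else d)
      PySem.Dict.empty).keys

def givePossA (word : List Char) (wl : List (List Char)) : List (List Char) :=
  let possible := wl.foldl (fun acc strings =>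
      if word = PySem.List.slice strings none (some (word.length : Int)) then acc ++ [strings]
      else acc) []
  if possible.length = 0 then possible
  else
    let hints := possible.foldl (fun hs poss =>
        if PySem.List.slice poss (some (word.length : Int)) (some ((word.length : Int) + 1)) ∈ hs
        then hs
        else hs ++ [PySem.List.slice poss (some (word.length : Int)) (some ((word.length : Int) + 1))]) []
    if hints.length > 0 then PySem.List.sorted hints (fun x => x) false else possible

def wouldWinFuelA : Nat → List Char → List (List Char) → Int → Bool
  | 0, _, _, _ => false
  | fuel + 1, possplay, wordlist, turn =>
    if possplay ∈ wordlist then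
      decide (PySem.Int.mod (possplay.length : Int) 2 = turn)
    else
      (givePossA possplay wordlist).any (fun poss =>
        wouldWinFuelA fuel (possplay ++ poss) (narrowA possplay wordlist)
          (PySem.Int.mod (turn + 1) 2) = false)

def wouldWin (possplay : String) (wordlist : List String) (turn : Int) : Bool :=
  wouldWinFuelA (pvTotalLen (wordlist.map String.toList) + 2)
    possplay.toList (wordlist.map String.toList) turn

-- ===== PORT B =====
def winBF : Nat → List (List Char) → Int → Int → Bool
  | 0, _, _, _ => false
  | fuel + 1, suffixes, par, turn =>
    if [] ∈ suffixes then decide (par = turn)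
    else
      (PySem.List.sorted
          (suffixes.foldl (fun st s => PySem.Set.add st (PySem.List.slice s none (some 1)))
            PySem.Set.empty)
          (fun x => x) false).any (fun c =>
        winBF fuel
          ((suffixes.filter (fun s => PySem.List.slice s none (some 1) == c)).map
            (fun s => PySem.List.slice s (some 1) none))
          (1 - par) (PySem.Int.mod (turn + 1) 2) = false)

def wouldWin_alt (possplay : String) (wordlist : List String) (turn : Int) : Bool :=
  winBF (pvTotalLen (wordlist.map String.toList) + 2)
    (((wordlist.map String.toList).filter
        (fun w => PySem.List.slice w none (some (possplay.toList.length : Int)) == possplay.toList)).map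
      (fun w => PySem.List.slice w (some (possplay.toList.length : Int)) none))
    (PySem.Int.mod (possplay.toList.length : Int) 2) turn

-- ===== PRECONDITION & SPEC =====
def Spec_wouldWin (possplay : String) (wordlist : List String) (turn : Int) (out : Bool) : Prop := out = wouldWin_alt possplay wordlist turn
instance (possplay : String) (wordlist : List String) (turn : Int) (out : Bool) : Decidable (Spec_wouldWin possplay wordlist turn out) := by unfold Spec_wouldWin; infer_instance

-- ===== CLAIM (what is proved, stated in full; the proofs are below) =====
def Claim_equal_wouldWin : Prop := ∀ (possplay : String) (wordlist : List String) (turn : Int), Dom_wouldWin possplay wordlist turn → Spec_wouldWin possplay wordlist turn (wouldWin possplay wordlist turn)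

-- ===== LEMMAS AND PROOFS =====

-- small slice facts (the forms the ports use, in take/drop form)
lemma pv_slice_take1 (s : List Char) : PySem.List.slice s none (some 1) = s.take 1 := by
  rw [PySem.List.slice_to s (by norm_num)]; rfl

lemma pv_slice_drop1 (s : List Char) : PySem.List.slice s (some 1) none = s.drop 1 := by
  rw [PySem.List.slice_from s (by norm_num)]; rfl

lemma pv_slice_letter (poss : List Char) (n : Nat) :
    PySem.List.slice poss (some (n : Int)) (some ((n : Int) + 1)) = (poss.drop n).take 1 := by
  rw [PySem.List.slice_toNat poss (by positivity) (by positivity)]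
  have h1 : ((n : Int) + 1).toNat = n + 1 := by omega
  have h2 : ((n : Int)).toNat = n := by omega
  rw [h1, h2]; simp

-- A's append-loop for `possible` is a filter
lemma pv_possible_eq (p : List Char) (wl : List (List Char)) :
    wl.foldl (fun acc s =>
        if p = PySem.List.slice s none (some (p.length : Int)) then acc ++ [s] else acc) []
      = wl.filter (fun s => s.take p.length == p) := by
  rw [PySem.List.foldl_append_ite_eq_filter]
  simp only [List.nil_append]
  apply List.filter_congr
  intro s _
  rw [PySem.List.slice_to_natCast, Bool.eq_iff_iff]
  simp only [beq_iff_eq, decide_eq_true_eq]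
  exact eq_comm

-- A's `not in`-guarded append loop is ordered dedup, i.e. PySem.Set.ofList of the mapped list
lemma pv_dedup_eq (l : List (List Char)) (f : List Char → List Char) :
    l.foldl (fun hs x => if f x ∈ hs then hs else hs ++ [f x]) [] = PySem.Set.ofList (l.map f) := by
  rw [PySem.Set.ofList_eq_foldl, List.foldl_map]
  exact (PySem.List.foldl_congr_mem _ _ _ _ (fun acc x _ => by simp [PySem.Set.add])).symm

-- B's letter-collecting loop builds the set of first letters
lemma pv_letters_eq (sufs : List (List Char)) :
    sufs.foldl (fun st s => PySem.Set.add st (PySem.List.slice s none (some 1))) PySem.Set.empty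
      = PySem.Set.ofList (sufs.map (fun s => s.take 1)) := by
  rw [PySem.Set.ofList_eq_foldl, List.foldl_map]
  simp only [pv_slice_take1]
  rfl

lemma pv_mem_narrowA (p : List Char) (wl : List (List Char)) (w : List Char) :
    w ∈ narrowA p wl ↔ w ∈ wl ∧ w.take p.length = p := by
  unfold narrowA
  split_ifs with h
  · subst h; simp
  · rw [PySem.List.foldl_ite_eq_foldl_filter
        (p := fun s => p = PySem.List.slice s none (some (p.length : Int)))
        (f := fun (d : PySem.Dict (List Char) Unit) s => d.insert s ())]
    rw [PySem.Dict.keys_foldl_insert _ (fun _ _ => ()) PySem.Dict.empty,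
      PySem.Dict.keys_empty, PySem.Set.update_eq_foldl, ← PySem.Set.ofList_eq_foldl,
      PySem.Set.mem_ofList, List.mem_filter]
    rw [PySem.List.slice_to_natCast]
    simp [eq_comm]

lemma pv_eq_word_iff (w p : List Char) :
    (w.take p.length = p ∧ w.drop p.length = []) ↔ w = p := by
  constructor
  · rintro ⟨h1, h2⟩
    conv_lhs => rw [← List.take_append_drop p.length w]
    rw [h1, h2, List.append_nil]
  · rintro rfl; simp

lemma pv_take_succ_iff (w p c : List Char) :
    (w.take p.length = p ∧ (w.drop p.length).take 1 = c) ↔ w.take (p.length + 1) = p ++ c := by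
  constructor
  · rintro ⟨h1, h2⟩; rw [List.take_add, h1, h2]
  · intro h
    have h1 : w.take p.length = p := by
      have h' := congrArg (List.take p.length) h
      rw [List.take_take, Nat.min_eq_left (Nat.le_succ _)] at h'
      rwa [List.take_left] at h'
    refine ⟨h1, ?_⟩
    rw [List.take_add, h1] at h
    exact List.append_cancel_left h

lemma pv_par_flip (n : Nat) :
    1 - PySem.Int.mod (n : Int) 2 = PySem.Int.mod ((n : Int) + 1) 2 := by
  rw [PySem.Int.mod_eq_emod_of_pos (by norm_num), PySem.Int.mod_eq_emod_of_pos (by norm_num)]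
  omega

lemma pv_sorted_perm (xs ys : List (List Char)) (h : xs.Perm ys) :
    PySem.List.sorted xs (fun x => x) false = PySem.List.sorted ys (fun x => x) false := by
  rw [show (fun (a b : List Char) => a.decidableLT b) = (LinearOrder.toDecidableLT : DecidableLT (List Char))
      from funext fun a => funext fun b => Subsingleton.elim _ _]
  exact PySem.List.sorted_eq_sorted_of_perm xs ys (fun a => a) (fun a b h => h) h

lemma pv_givePossA_eq (p : List Char) (wl : List (List Char)) :
    givePossA p wl = PySem.List.sorted
      (PySem.Set.ofList ((wl.filter (fun w => w.take p.length == p)).map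
        (fun w => (w.drop p.length).take 1)))
      (fun x => x) false := by
  unfold givePossA
  simp only [pv_possible_eq, pv_slice_letter, pv_dedup_eq]
  cases hF : wl.filter (fun w => w.take p.length == p) with
  | nil => simp [PySem.List.sorted_eq_nil_iff]
  | cons w ws =>
    have hne : (PySem.Set.ofList ((w :: ws).map (fun w => (w.drop p.length).take 1))) ≠ [] := by
      intro hnil
      have hm : (w.drop p.length).take 1
          ∈ (PySem.Set.ofList ((w :: ws).map (fun w => (w.drop p.length).take 1))) := by
        rw [PySem.Set.mem_ofList]; simp
      rw [hnil] at hm; simp at hm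
    simp only [List.length_cons, if_neg (by omega : ¬ (ws.length + 1 = 0))]
    rw [if_pos]
    have := List.length_pos_iff.mpr hne
    omega

theorem pv_main : ∀ (fuel : Nat) (p : List Char) (wl : List (List Char)) (t : Int)
    (sufs : List (List Char)) (par : Int),
    (∀ s, s ∈ sufs ↔ ∃ w ∈ wl, w.take p.length = p ∧ w.drop p.length = s) →
    par = PySem.Int.mod (p.length : Int) 2 →
    winBF fuel sufs par t = wouldWinFuelA fuel p wl t := by
  intro fuel
  induction fuel with
  | zero => intro p wl t sufs par _ _; rfl
  | succ fuel ih =>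
    intro p wl t sufs par hs hpar
    have hmem : ([] ∈ sufs) ↔ (p ∈ wl) := by
      rw [hs []]
      constructor
      · rintro ⟨w, hw, h1, h2⟩
        exact ((pv_eq_word_iff w p).1 ⟨h1, h2⟩) ▸ hw
      · intro hp; exact ⟨p, hp, by simp, by simp⟩
    simp only [winBF, wouldWinFuelA]
    by_cases hpw : p ∈ wl
    · rw [if_pos (hmem.mpr hpw), if_pos hpw, hpar]
    · rw [if_neg (fun h => hpw (hmem.mp h)), if_neg hpw]
      rw [pv_letters_eq, pv_givePossA_eq]
      have hperm : (PySem.Set.ofList (sufs.map (fun s => s.take 1))).Perm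
          (PySem.Set.ofList ((wl.filter (fun w => w.take p.length == p)).map
            (fun w => (w.drop p.length).take 1))) := by
        rw [List.perm_ext_iff_of_nodup (PySem.Set.nodup_ofList _) (PySem.Set.nodup_ofList _)]
        intro c
        rw [PySem.Set.mem_ofList, PySem.Set.mem_ofList]
        constructor
        · intro hcm
          obtain ⟨s, hsm, rfl⟩ := List.mem_map.mp hcm
          obtain ⟨w, hw, h1, h2⟩ := (hs s).mp hsm
          exact List.mem_map.mpr ⟨w, List.mem_filter.mpr ⟨hw, by simp [h1]⟩, by rw [h2]⟩
        · intro hcm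
          obtain ⟨w, hwm, rfl⟩ := List.mem_map.mp hcm
          obtain ⟨hw, h1⟩ := List.mem_filter.mp hwm
          exact List.mem_map.mpr ⟨w.drop p.length,
            (hs _).mpr ⟨w, hw, by simpa using h1, rfl⟩, rfl⟩
      rw [pv_sorted_perm _ _ hperm]
      apply PySem.List.any_congr_mem
      intro c hc
      rw [PySem.List.mem_sorted, PySem.Set.mem_ofList] at hc
      obtain ⟨w, hwm, rfl⟩ := List.mem_map.mp hc
      obtain ⟨hw, h1'⟩ := List.mem_filter.mp hwm
      have h1 : w.take p.length = p := by simpa using h1'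
      have hwd : w.drop p.length ≠ [] := by
        intro hnil
        exact hpw (((pv_eq_word_iff w p).1 ⟨h1, hnil⟩) ▸ hw)
      set c := (w.drop p.length).take 1 with hcdef
      have hc1 : c.length = 1 := by
        rw [hcdef, List.length_take]
        have := List.length_pos_iff.mpr hwd
        omega
      have hrec := ih (p ++ c) (narrowA p wl) (PySem.Int.mod (t + 1) 2)
        ((sufs.filter (fun s => PySem.List.slice s none (some 1) == c)).map
          (fun s => PySem.List.slice s (some 1) none))
        (1 - par) ?_ ?_
      · rw [hrec]
      · -- suffix-list invariant at the extended prefix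
        intro s'
        constructor
        · intro hmem'
          obtain ⟨s, hsm', hss⟩ := List.mem_map.mp hmem'
          obtain ⟨hsm, hhead'⟩ := List.mem_filter.mp hsm'
          have hhead : s.take 1 = c := by simpa [pv_slice_take1] using hhead'
          obtain ⟨w', hw', hh1, hh2⟩ := (hs s).mp hsm
          refine ⟨w', (pv_mem_narrowA p wl w').mpr ⟨hw', hh1⟩, ?_, ?_⟩
          · rw [List.length_append, hc1]
            exact (pv_take_succ_iff w' p c).mp ⟨hh1, by rw [hh2]; exact hhead⟩
          · rw [List.length_append, hc1, ← List.drop_drop, hh2, ← pv_slice_drop1, hss]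
        · rintro ⟨w', hw', hh1, hh2⟩
          rw [List.length_append, hc1] at hh1 hh2
          obtain ⟨hw'wl, _⟩ := (pv_mem_narrowA p wl w').mp hw'
          obtain ⟨k1, k2⟩ := (pv_take_succ_iff w' p c).mpr hh1
          refine List.mem_map.mpr ⟨w'.drop p.length,
            List.mem_filter.mpr ⟨(hs _).mpr ⟨w', hw'wl, k1, rfl⟩,
              by simp [pv_slice_take1, k2]⟩, ?_⟩
          rw [pv_slice_drop1, List.drop_drop, hh2]
      · -- parity flip
        rw [hpar, List.length_append, hc1]
        push_cast
        exact pv_par_flip p.length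

-- ===== VERDICT (by name: the statement is the Claim_ definition above) =====
theorem wouldWin_spec : Claim_equal_wouldWin := by
  intro possplay wordlist turn _
  unfold Spec_wouldWin wouldWin wouldWin_alt
  refine (pv_main _ possplay.toList (wordlist.map String.toList) turn _ _ ?_ rfl).symm
  intro s
  simp only [List.mem_map, List.mem_filter, beq_iff_eq,
    PySem.List.slice_to_natCast, PySem.List.slice_from_natCast]
  constructor
  · rintro ⟨w, ⟨hw, h1⟩, h2⟩; exact ⟨w, hw, h1, h2⟩
  · rintro ⟨w, hw, h1, h2⟩; exact ⟨w, ⟨hw, h1⟩, h2⟩
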